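-- pv_equiv track=rewrite | github.com/reedwi/edabit-challenges | app.py | advanced_sort
-- ===== SOURCE A (Python) =====
-- def advanced_sort(lst):
--     result = {}
--     for x in lst:
--         if not result.get(x):
--             result[x] = [x]
--         else:
--             result[x].append(x)
--
--     dic_lst = list(result.values())
--     return sorted(dic_lst, key= lambda x: lst.index(x[0]))
-- ===== SOURCE B (Python) =====
-- def advanced_sort(lst):
--     counts = {}
--     for x in lst:
--         counts[x] = counts.get(x, 0) + 1
--     return [[x] * c for x, c in counts.items()]
-- ===== Notes on version B (the rewrite author's own statement) =====
-- stated objective: faster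
-- what changed: Replaced the grouping dict of lists plus a sort keyed by repeated lst.index scans with a single counting pass and a replicate-per-distinct-key rebuild; no sort and no index scans, since dict insertion order already is first-occurrence order.
import Mathlib
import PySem

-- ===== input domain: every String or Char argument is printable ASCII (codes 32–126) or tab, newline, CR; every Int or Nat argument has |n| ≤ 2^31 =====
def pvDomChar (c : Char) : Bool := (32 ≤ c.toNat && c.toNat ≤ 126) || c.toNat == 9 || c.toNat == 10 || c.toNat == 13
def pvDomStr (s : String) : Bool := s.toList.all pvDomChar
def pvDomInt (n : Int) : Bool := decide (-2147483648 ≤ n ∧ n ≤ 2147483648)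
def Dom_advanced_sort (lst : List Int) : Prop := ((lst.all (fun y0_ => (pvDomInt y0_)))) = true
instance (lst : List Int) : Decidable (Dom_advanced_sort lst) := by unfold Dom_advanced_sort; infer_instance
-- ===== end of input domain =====

-- B groups by one counting pass and rebuilds each group with replicate; A's sort and per-key lst.index scans disappear (first-occurrence order is the dict's insertion order).

-- ===== PORT A =====
-- 'if not result.get(x)' is falsy for both a missing key and an empty list value.
-- sort key 'lst.index(x[0])': every group is nonempty and its head occurs in lst, so the
-- total forms (pyGetD _ 0 0 and (index? _ _).getD 0) are exact here.
def advanced_sort (lst : List Int) : List (List Int) :=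
  let result : PySem.Dict Int (List Int) :=
    lst.foldl (fun d x =>
      match d.get? x with
      | none => d.insert x [x]
      | some l => if l = [] then d.insert x [x] else d.modify x [] (fun v => v ++ [x]))
      PySem.Dict.empty
  let dic_lst := result.values
  PySem.List.sorted dic_lst (fun g => (PySem.List.index? lst (PySem.List.pyGetD g 0 0)).getD 0) false

-- ===== PORT B =====
def advanced_sort_alt (lst : List Int) : List (List Int) :=
  let counts : PySem.Dict Int Int :=
    lst.foldl (fun d x => d.insert x (d.getD x 0 + 1)) PySem.Dict.empty
  counts.items.map (fun p => List.replicate p.2.toNat p.1)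

-- ===== PRECONDITION & SPEC =====
def Spec_advanced_sort (lst : List Int) (out : List (List Int)) : Prop := out = advanced_sort_alt lst
instance (lst : List Int) (out : List (List Int)) : Decidable (Spec_advanced_sort lst out) := by unfold Spec_advanced_sort; infer_instance

-- ===== CLAIM (what is proved, stated in full; the proofs are below) =====
def Claim_equal_advanced_sort : Prop := ∀ (lst : List Int), Dom_advanced_sort lst → Spec_advanced_sort lst (advanced_sort lst)

-- ===== LEMMAS AND PROOFS =====

def pvGStep (d : PySem.Dict Int (List Int)) (x : Int) : PySem.Dict Int (List Int) :=
  d.modify x [] (fun v => v ++ [x])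

-- A's loop step equals the plain grouping step on dicts that never map a key to [];
-- that invariant holds along the loop.
def pvNoEmpty (d : PySem.Dict Int (List Int)) : Prop := ∀ k, d.get? k ≠ some []

lemma pvStep_eq (d : PySem.Dict Int (List Int)) (x : Int) (h : pvNoEmpty d) :
    (match d.get? x with
      | none => d.insert x [x]
      | some l => if l = [] then d.insert x [x] else d.modify x [] (fun v => v ++ [x]))
      = pvGStep d x := by
  cases hx : d.get? x with
  | none => simp [pvGStep, PySem.Dict.modify, PySem.Dict.getD_eq_get?_getD, hx]
  | some l =>
    have hl : l ≠ [] := fun he => h x (he ▸ hx)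
    simp [pvGStep, hl]

lemma pvNoEmpty_step (d : PySem.Dict Int (List Int)) (x : Int) (h : pvNoEmpty d) :
    pvNoEmpty (pvGStep d x) := by
  intro k
  have : pvGStep d x = d.insert x (d.getD x [] ++ [x]) := by
    simp [pvGStep, PySem.Dict.modify]
  rw [this, PySem.Dict.get?_insert]
  split_ifs with hk
  · simp
  · exact h k

lemma pvFoldA_gen (lst : List Int) (d : PySem.Dict Int (List Int)) (h : pvNoEmpty d) :
    lst.foldl (fun d x =>
      match d.get? x with
      | none => d.insert x [x]
      | some l => if l = [] then d.insert x [x] else d.modify x [] (fun v => v ++ [x])) d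
    = lst.foldl pvGStep d := by
  induction lst generalizing d with
  | nil => rfl
  | cons a t ih =>
    simp only [List.foldl_cons]
    rw [pvStep_eq d a h]
    exact ih (pvGStep d a) (pvNoEmpty_step d a h)

-- the grouping fold characterised: each key maps to replicate (count), keys are the
-- distinct values in first-occurrence order
lemma pvGroup_getD (lst : List Int) (c : Int) :
    (lst.foldl pvGStep PySem.Dict.empty).getD c [] = List.replicate (lst.count c) c := by
  have h : lst.foldl pvGStep (PySem.Dict.empty : PySem.Dict Int (List Int))
      = (lst.map (fun x => (x, x))).foldl (fun d p => d.modify p.1 [] (fun v => v ++ [p.2])) PySem.Dict.empty := by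
    rw [List.foldl_map]; rfl
  rw [h, PySem.Dict.getD_foldl_modify_append]
  simp [List.filter_map, Function.comp_def]
  rw [List.filter_beq]

lemma pvGroup_keys (lst : List Int) :
    (lst.foldl pvGStep (PySem.Dict.empty : PySem.Dict Int (List Int))).keys = PySem.Set.ofList lst := by
  unfold pvGStep
  rw [PySem.Dict.keys_foldl_modify]
  simp [pysem]

lemma pvGroup_nodup (lst : List Int) :
    (lst.foldl pvGStep (PySem.Dict.empty : PySem.Dict Int (List Int))).keys.Nodup := by
  exact PySem.Dict.nodup_keys_foldl_modify_key lst (fun x => x) [] (fun d x => fun v => v ++ [x]) _ (by simp)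

lemma pvGroup_values (lst : List Int) :
    (lst.foldl pvGStep (PySem.Dict.empty : PySem.Dict Int (List Int))).values
      = (PySem.Set.ofList lst).map (fun k => List.replicate (lst.count k) k) := by
  rw [PySem.Dict.values_eq_map_keys _ (pvGroup_nodup lst) [], pvGroup_keys]
  exact List.map_congr_left (fun k _ => pvGroup_getD lst k)

-- first-occurrence order: the distinct values, in order of first appearance, have
-- strictly increasing first indices
lemma pvPairwise_index? (lst : List Int) :
    (PySem.Set.ofList lst).Pairwise
      (fun a b => (PySem.List.index? lst a).getD 0 < (PySem.List.index? lst b).getD 0) := by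
  induction lst using List.reverseRecOn with
  | nil => simp [pysem]
  | append_singleton l x ih =>
    rw [PySem.Set.ofList_append_singleton]
    have hbase : (PySem.Set.ofList l).Pairwise
        (fun a b => (PySem.List.index? (l ++ [x]) a).getD 0 < (PySem.List.index? (l ++ [x]) b).getD 0) := by
      refine List.Pairwise.imp_of_mem ?_ ih
      intro a b ha hb hr
      have ha' : a ∈ l := (PySem.Set.mem_ofList _ _).1 ha
      have hb' : b ∈ l := (PySem.Set.mem_ofList _ _).1 hb
      rwa [PySem.List.index?_append_of_mem _ ha', PySem.List.index?_append_of_mem _ hb']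
    by_cases hx : x ∈ l
    · rw [PySem.Set.add_of_mem ((PySem.Set.mem_ofList _ _).2 hx)]
      exact hbase
    · rw [PySem.Set.add_of_not_mem (fun h => hx ((PySem.Set.mem_ofList _ _).1 h))]
      rw [List.pairwise_append]
      refine ⟨hbase, by simp, ?_⟩
      intro a ha b hb
      simp at hb; subst hb
      have ha' : a ∈ l := (PySem.Set.mem_ofList _ _).1 ha
      rw [PySem.List.index?_append_of_mem _ ha', PySem.List.index?_append_singleton_self l b hx]
      obtain ⟨k, hk⟩ := Option.isSome_iff_exists.1 ((PySem.List.index?_isSome_iff _ _).2 ha')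
      obtain ⟨hlt, -, -⟩ := PySem.List.getElem_of_index?_eq_some hk
      rw [hk]
      simpa using hlt

lemma pvAlt_eq (lst : List Int) :
    advanced_sort_alt lst = (PySem.Set.ofList lst).map (fun k => List.replicate (lst.count k) k) := by
  unfold advanced_sort_alt
  dsimp only
  rw [PySem.Dict.foldl_insert_getD_add_one_eq_counter, PySem.Dict.items_counter]
  simp [List.map_map, Function.comp_def]

lemma pvKey_group (lst : List Int) (k : Int) (hk : k ∈ lst) :
    (PySem.List.index? lst (PySem.List.pyGetD (List.replicate (lst.count k) k) 0 0)).getD 0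
      = (PySem.List.index? lst k).getD 0 := by
  have hc : 0 < lst.count k := List.count_pos_iff.2 hk
  have : List.replicate (lst.count k) k = k :: List.replicate (lst.count k - 1) k := by
    cases h : lst.count k with
    | zero => omega
    | succ n => simp [List.replicate_succ]
  rw [this, PySem.List.pyGetD_zero_cons]

-- ===== VERDICT (by name: the statement is the Claim_ definition above) =====
theorem advanced_sort_spec : Claim_equal_advanced_sort := by
  intro lst _
  unfold Spec_advanced_sort advanced_sort
  dsimp only
  rw [pvFoldA_gen lst PySem.Dict.empty (by intro k; simp [PySem.Dict.get?_empty]), pvGroup_values, pvAlt_eq]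
  apply PySem.List.sorted_eq_of_perm_of_pairwise_lt
  · exact List.Perm.refl _
  · rw [List.pairwise_map]
    refine List.Pairwise.imp_of_mem ?_ (pvPairwise_index? lst)
    intro a b ha hb hr
    have ha' : a ∈ lst := (PySem.Set.mem_ofList _ _).1 ha
    have hb' : b ∈ lst := (PySem.Set.mem_ofList _ _).1 hb
    rwa [pvKey_group lst a ha', pvKey_group lst b hb']
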